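-- pv_equiv track=rewrite | github.com/player20/AI-agents | apps/api/src/services/domain_analyzers.py | _analyze_folder_organization
-- ===== SOURCE A (Python) =====
-- from typing import Optional, List, Dict, Any, Set
--
-- def _analyze_folder_organization(files: Dict[str, str]) -> str:
--     """Describe folder organization pattern"""
--     paths = list(files.keys())
--
--     if any("features/" in p or "modules/" in p for p in paths):
--         return "Feature-based organization"
--     if any("domain/" in p for p in paths):
--         return "Domain-driven organization"
--     if any("layers/" in p for p in paths):
--         return "Layered architecture"
--     if any("/controllers/" in p and "/models/" in p for p in paths):
--         return "MVC pattern"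
--     if any("/src/" in p for p in paths):
--         return "Standard src layout"
--
--     return "Flat organization"
-- ===== SOURCE B (Python) =====
-- def _analyze_folder_organization(files):
--     """Describe folder organization pattern via priority scoring:
--     each path gets a numeric rank (max of weighted marker flags),
--     the answer is the label of the maximum rank over all paths."""
--     LABELS = ["Flat organization", "Standard src layout", "MVC pattern",
--               "Layered architecture", "Domain-driven organization",
--               "Feature-based organization"]
--     best = 0
--     for p in files:
--         r = max(5 * ("features/" in p or "modules/" in p),
--                 4 * ("domain/" in p),
--                 3 * ("layers/" in p),
--                 2 * ("/controllers/" in p and "/models/" in p),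
--                 1 * ("/src/" in p))
--         best = max(best, r)
--     return LABELS[best]
-- ===== Notes on version B (the rewrite author's own statement) =====
-- stated objective: alternative
-- what changed: Replaces the early-return chain of five any() substring scans with a priority-scoring scheme: each path is mapped once to a numeric rank (the max of weighted marker flags), the maximum rank over all paths is accumulated in a single pass, and the result is read from a label table indexed by that rank.
import Mathlib
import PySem

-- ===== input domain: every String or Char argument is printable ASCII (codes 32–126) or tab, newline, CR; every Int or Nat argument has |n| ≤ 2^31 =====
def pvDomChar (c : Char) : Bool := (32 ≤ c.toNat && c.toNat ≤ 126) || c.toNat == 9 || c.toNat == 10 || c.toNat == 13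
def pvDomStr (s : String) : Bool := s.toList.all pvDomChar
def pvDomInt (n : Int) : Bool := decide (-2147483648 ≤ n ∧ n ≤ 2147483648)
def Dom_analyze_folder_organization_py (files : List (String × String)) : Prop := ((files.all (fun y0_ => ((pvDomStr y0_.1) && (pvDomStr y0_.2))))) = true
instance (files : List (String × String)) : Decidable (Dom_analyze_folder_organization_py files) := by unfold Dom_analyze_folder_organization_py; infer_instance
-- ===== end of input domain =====

-- B replaces A's five-stage early-return chain of any() scans with a priority-scoring
-- scheme: each path is mapped to a numeric rank (max of weighted marker flags), the
-- maximum rank over all paths is accumulated, and the answer is read from a label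
-- table indexed by that rank (objective: alternative).


-- ===== PORT A =====
def analyze_folder_organization_py (files : List (String × String)) : String :=
  let paths := (PySem.Dict.ofList files).keys
  if paths.any (fun p => PySem.Str.isIn "features/" p || PySem.Str.isIn "modules/" p) then
    "Feature-based organization"
  else if paths.any (fun p => PySem.Str.isIn "domain/" p) then
    "Domain-driven organization"
  else if paths.any (fun p => PySem.Str.isIn "layers/" p) then
    "Layered architecture"
  else if paths.any (fun p => PySem.Str.isIn "/controllers/" p && PySem.Str.isIn "/models/" p) then
    "MVC pattern"
  else if paths.any (fun p => PySem.Str.isIn "/src/" p) then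
    "Standard src layout"
  else
    "Flat organization"

-- ===== PORT B =====
-- rank of one path: max of the weighted marker flags (Python's 5 * bool, … under max)
def pvRank (p : String) : Nat :=
  max (if PySem.Str.isIn "features/" p || PySem.Str.isIn "modules/" p then 5 else 0)
   (max (if PySem.Str.isIn "domain/" p then 4 else 0)
    (max (if PySem.Str.isIn "layers/" p then 3 else 0)
     (max (if PySem.Str.isIn "/controllers/" p && PySem.Str.isIn "/models/" p then 2 else 0)
      (if PySem.Str.isIn "/src/" p then 1 else 0))))

def pvLabels : List String :=
  ["Flat organization", "Standard src layout", "MVC pattern",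
   "Layered architecture", "Domain-driven organization", "Feature-based organization"]

def analyze_folder_organization_py_alt (files : List (String × String)) : String :=
  let best := ((PySem.Dict.ofList files).keys).foldl (fun b p => max b (pvRank p)) 0
  pvLabels.getD best ""

-- ===== PRECONDITION & SPEC =====
def Spec_analyze_folder_organization_py (files : List (String × String)) (out : String) : Prop := out = analyze_folder_organization_py_alt files
instance (files : List (String × String)) (out : String) : Decidable (Spec_analyze_folder_organization_py files out) := by unfold Spec_analyze_folder_organization_py; infer_instance

-- ===== CLAIM (what is proved, stated in full; the proofs are below) =====
def Claim_equal_analyze_folder_organization_py : Prop := ∀ (files : List (String × String)), Dom_analyze_folder_organization_py files → Spec_analyze_folder_organization_py files (analyze_folder_organization_py files)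

-- ===== LEMMAS AND PROOFS =====

theorem foldl_max_rank (l : List String) (a : Nat) :
    l.foldl (fun b p => max b (pvRank p)) a
      = max a (l.foldr (fun p b => max (pvRank p) b) 0) := by
  induction l generalizing a with
  | nil => simp
  | cons h t ih => simp [ih, Nat.max_assoc]

-- abbreviation for the maximum rank of a list of paths
def pvBest (l : List String) : Nat := l.foldr (fun p b => max (pvRank p) b) 0

theorem rank_le_five (p : String) : pvRank p ≤ 5 := by
  unfold pvRank; split_ifs <;> simp

theorem best_ge_iff (l : List String) (k : Nat) (hk : 0 < k) :
    k ≤ pvBest l ↔ ∃ p ∈ l, k ≤ pvRank p := by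
  induction l with
  | nil => simp [pvBest]; omega
  | cons h t ih =>
    simp only [pvBest, List.foldr_cons, le_max_iff, List.mem_cons]
    constructor
    · rintro (h1 | h2)
      · exact ⟨h, Or.inl rfl, h1⟩
      · obtain ⟨p, hp, hr⟩ := (ih).mp h2
        exact ⟨p, Or.inr hp, hr⟩
    · rintro ⟨p, (rfl | hp), hr⟩
      · exact Or.inl hr
      · exact Or.inr ((ih).mpr ⟨p, hp, hr⟩)

theorem best_le_five (l : List String) : pvBest l ≤ 5 := by
  induction l with
  | nil => simp [pvBest]
  | cons h t ih => simp only [pvBest, List.foldr_cons, Nat.max_le]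
                   exact ⟨rank_le_five h, ih⟩

-- how 'k ≤ pvRank p' reads off the five marker flags
theorem rank_ge_5 (p : String) :
    5 ≤ pvRank p ↔ (PySem.Str.isIn "features/" p || PySem.Str.isIn "modules/" p) = true := by
  unfold pvRank; split_ifs <;> simp_all

theorem rank_ge_4 (p : String) :
    4 ≤ pvRank p ↔ ((PySem.Str.isIn "features/" p || PySem.Str.isIn "modules/" p)
      || PySem.Str.isIn "domain/" p) = true := by
  unfold pvRank; split_ifs <;> simp_all

theorem rank_ge_3 (p : String) :
    3 ≤ pvRank p ↔ ((PySem.Str.isIn "features/" p || PySem.Str.isIn "modules/" p)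
      || PySem.Str.isIn "domain/" p || PySem.Str.isIn "layers/" p) = true := by
  unfold pvRank; split_ifs <;> simp_all

theorem rank_ge_2 (p : String) :
    2 ≤ pvRank p ↔ ((PySem.Str.isIn "features/" p || PySem.Str.isIn "modules/" p)
      || PySem.Str.isIn "domain/" p || PySem.Str.isIn "layers/" p
      || (PySem.Str.isIn "/controllers/" p && PySem.Str.isIn "/models/" p)) = true := by
  unfold pvRank; split_ifs <;> simp_all

theorem rank_ge_1 (p : String) :
    1 ≤ pvRank p ↔ ((PySem.Str.isIn "features/" p || PySem.Str.isIn "modules/" p)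
      || PySem.Str.isIn "domain/" p || PySem.Str.isIn "layers/" p
      || (PySem.Str.isIn "/controllers/" p && PySem.Str.isIn "/models/" p)
      || PySem.Str.isIn "/src/" p) = true := by
  unfold pvRank; split_ifs <;> simp_all

-- the core correspondence over an arbitrary list of paths
theorem chain_eq_table (l : List String) :
    (if l.any (fun p => PySem.Str.isIn "features/" p || PySem.Str.isIn "modules/" p) then
      "Feature-based organization"
    else if l.any (fun p => PySem.Str.isIn "domain/" p) then
      "Domain-driven organization"
    else if l.any (fun p => PySem.Str.isIn "layers/" p) then
      "Layered architecture"
    else if l.any (fun p => PySem.Str.isIn "/controllers/" p && PySem.Str.isIn "/models/" p) then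
      "MVC pattern"
    else if l.any (fun p => PySem.Str.isIn "/src/" p) then
      "Standard src layout"
    else
      "Flat organization")
    = pvLabels.getD (pvBest l) "" := by
  by_cases h5 : l.any (fun p => PySem.Str.isIn "features/" p || PySem.Str.isIn "modules/" p) = true
  · have hge : 5 ≤ pvBest l := by
      rw [best_ge_iff l 5 (by omega)]
      obtain ⟨p, hp, hf⟩ := List.any_eq_true.mp h5
      exact ⟨p, hp, (rank_ge_5 p).mpr hf⟩
    have : pvBest l = 5 := le_antisymm (best_le_five l) hge
    rw [if_pos h5, this]; rfl
  · by_cases h4 : l.any (fun p => PySem.Str.isIn "domain/" p) = true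
    · have hge : 4 ≤ pvBest l := by
        rw [best_ge_iff l 4 (by omega)]
        obtain ⟨p, hp, hf⟩ := List.any_eq_true.mp h4
        exact ⟨p, hp, (rank_ge_4 p).mpr (by simp only [hf, Bool.or_true])⟩
      have hlt : ¬ 5 ≤ pvBest l := by
        rw [best_ge_iff l 5 (by omega)]
        rintro ⟨p, hp, hr⟩
        exact h5 (List.any_eq_true.mpr ⟨p, hp, (rank_ge_5 p).mp hr⟩)
      have : pvBest l = 4 := by omega
      rw [if_neg h5, if_pos h4, this]; rfl
    · by_cases h3 : l.any (fun p => PySem.Str.isIn "layers/" p) = true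
      · have hge : 3 ≤ pvBest l := by
          rw [best_ge_iff l 3 (by omega)]
          obtain ⟨p, hp, hf⟩ := List.any_eq_true.mp h3
          exact ⟨p, hp, (rank_ge_3 p).mpr (by simp only [hf, Bool.or_true])⟩
        have hlt : ¬ 4 ≤ pvBest l := by
          rw [best_ge_iff l 4 (by omega)]
          rintro ⟨p, hp, hr⟩
          rcases Bool.or_eq_true_iff.mp ((rank_ge_4 p).mp hr) with hf | hd
          · exact h5 (List.any_eq_true.mpr ⟨p, hp, hf⟩)
          · exact h4 (List.any_eq_true.mpr ⟨p, hp, hd⟩)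
        have : pvBest l = 3 := by omega
        rw [if_neg h5, if_neg h4, if_pos h3, this]; rfl
      · by_cases h2 : l.any (fun p => PySem.Str.isIn "/controllers/" p && PySem.Str.isIn "/models/" p) = true
        · have hge : 2 ≤ pvBest l := by
            rw [best_ge_iff l 2 (by omega)]
            obtain ⟨p, hp, hf⟩ := List.any_eq_true.mp h2
            exact ⟨p, hp, (rank_ge_2 p).mpr (by simp only [hf, Bool.or_true])⟩
          have hlt : ¬ 3 ≤ pvBest l := by
            rw [best_ge_iff l 3 (by omega)]
            rintro ⟨p, hp, hr⟩
            rcases Bool.or_eq_true_iff.mp ((rank_ge_3 p).mp hr) with hfd | hl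
            · rcases Bool.or_eq_true_iff.mp hfd with hf | hd
              · exact h5 (List.any_eq_true.mpr ⟨p, hp, hf⟩)
              · exact h4 (List.any_eq_true.mpr ⟨p, hp, hd⟩)
            · exact h3 (List.any_eq_true.mpr ⟨p, hp, hl⟩)
          have : pvBest l = 2 := by omega
          rw [if_neg h5, if_neg h4, if_neg h3, if_pos h2, this]; rfl
        · by_cases h1 : l.any (fun p => PySem.Str.isIn "/src/" p) = true
          · have hge : 1 ≤ pvBest l := by
              rw [best_ge_iff l 1 (by omega)]
              obtain ⟨p, hp, hf⟩ := List.any_eq_true.mp h1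
              exact ⟨p, hp, (rank_ge_1 p).mpr (by simp only [hf, Bool.or_true])⟩
            have hlt : ¬ 2 ≤ pvBest l := by
              rw [best_ge_iff l 2 (by omega)]
              rintro ⟨p, hp, hr⟩
              rcases Bool.or_eq_true_iff.mp ((rank_ge_2 p).mp hr) with hfdl | hm
              · rcases Bool.or_eq_true_iff.mp hfdl with hfd | hl
                · rcases Bool.or_eq_true_iff.mp hfd with hf | hd
                  · exact h5 (List.any_eq_true.mpr ⟨p, hp, hf⟩)
                  · exact h4 (List.any_eq_true.mpr ⟨p, hp, hd⟩)
                · exact h3 (List.any_eq_true.mpr ⟨p, hp, hl⟩)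
              · exact h2 (List.any_eq_true.mpr ⟨p, hp, hm⟩)
            have : pvBest l = 1 := by omega
            rw [if_neg h5, if_neg h4, if_neg h3, if_neg h2, if_pos h1, this]; rfl
          · have hlt : ¬ 1 ≤ pvBest l := by
              rw [best_ge_iff l 1 (by omega)]
              rintro ⟨p, hp, hr⟩
              rcases Bool.or_eq_true_iff.mp ((rank_ge_1 p).mp hr) with hfdlm | hs
              · rcases Bool.or_eq_true_iff.mp hfdlm with hfdl | hm
                · rcases Bool.or_eq_true_iff.mp hfdl with hfd | hl
                  · rcases Bool.or_eq_true_iff.mp hfd with hf | hd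
                    · exact h5 (List.any_eq_true.mpr ⟨p, hp, hf⟩)
                    · exact h4 (List.any_eq_true.mpr ⟨p, hp, hd⟩)
                  · exact h3 (List.any_eq_true.mpr ⟨p, hp, hl⟩)
                · exact h2 (List.any_eq_true.mpr ⟨p, hp, hm⟩)
              · exact h1 (List.any_eq_true.mpr ⟨p, hp, hs⟩)
            have : pvBest l = 0 := by omega
            rw [if_neg h5, if_neg h4, if_neg h3, if_neg h2, if_neg h1, this]; rfl

-- ===== VERDICT (by name: the statement is the Claim_ definition above) =====
theorem analyze_folder_organization_py_spec : Claim_equal_analyze_folder_organization_py := by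
  intro files _
  unfold Spec_analyze_folder_organization_py analyze_folder_organization_py analyze_folder_organization_py_alt
  rw [foldl_max_rank]
  simpa using chain_eq_table ((PySem.Dict.ofList files).keys)
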